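-- pv_equiv track=rewrite | github.com/mitsuo0114/competitive_programming | python/atcoder/CODE FESTIVAL 2018/reA.py | solve
-- ===== SOURCE A (Python) =====
-- from collections import Counter
--
-- def solve(N, M, ABLs):
--     Ls = [Counter() for __ in range(N + 1)]
--     for a, b, l in ABLs:
--         Ls[a].update([l])
--         Ls[b].update([l])
--
--     ans = 0
--     for n in range(1, N + 1):
--         for l, c in Ls[n].items():
--             if l > 1270:
--                 continue
--             if l == 1270:
--                 ans += c * (c - 1) // 2
--             else:
--                 ans += c * Ls[n][2540 - l]
--     return ans
-- ===== SOURCE B (Python) =====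
-- def solve(N, M, ABLs):
--     adj = [[] for _ in range(N + 1)]
--     for a, b, l in ABLs:
--         adj[a].append(l)
--         adj[b].append(l)
--     ans = 0
--     for lengths in adj[1:]:
--         seen = {}
--         for x in lengths:
--             ans += seen.get(2540 - x, 0)
--             seen[x] = seen.get(x, 0) + 1
--     return ans
-- ===== Notes on version B (the rewrite author's own statement) =====
-- stated objective: simpler
-- what changed: A builds a Counter per node and then iterates its items(), multiplying each count by the count of its 2540-complement and special-casing the 1270 midpoint with c*(c-1)//2; B keeps a plain list of incident lengths per node and counts pairs in one streaming pass that adds, for each length, the number of complements already seen, with no midpoint special case.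
import Mathlib
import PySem

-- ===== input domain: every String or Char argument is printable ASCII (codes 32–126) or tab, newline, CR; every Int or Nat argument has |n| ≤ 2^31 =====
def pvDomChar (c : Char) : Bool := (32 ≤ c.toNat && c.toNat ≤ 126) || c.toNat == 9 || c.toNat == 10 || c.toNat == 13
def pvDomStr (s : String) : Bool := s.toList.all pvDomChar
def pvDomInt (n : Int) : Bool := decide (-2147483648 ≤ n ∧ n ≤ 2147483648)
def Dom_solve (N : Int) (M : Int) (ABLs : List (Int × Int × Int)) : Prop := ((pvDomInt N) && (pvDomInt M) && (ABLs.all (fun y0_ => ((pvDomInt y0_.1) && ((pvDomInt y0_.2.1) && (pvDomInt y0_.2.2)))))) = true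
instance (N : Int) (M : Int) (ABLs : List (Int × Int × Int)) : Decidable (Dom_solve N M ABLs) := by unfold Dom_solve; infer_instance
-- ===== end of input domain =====

-- B replaces A's per-node Counter + items() complement-product scan (with its c*(c-1)//2
-- midpoint special case) by per-node length lists and one streaming pass that counts, for
-- each length, the complements already seen — simpler, same cost.

-- ===== PORT A =====
-- Ls[a].update([l])  (Counter.update with a single element)
def pvCounterUpd (d : PySem.Dict Int Int) (l : Int) : PySem.Dict Int Int :=
  d.modify l 0 (· + 1)

def solve (N : Int) (M : Int) (ABLs : List (Int × Int × Int)) : Int :=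
  let Ls0 : List (PySem.Dict Int Int) :=
    (PySem.List.pyRange 0 (N + 1)).map (fun _ => PySem.Dict.empty)
  let Ls := ABLs.foldl (fun Ls p =>
    let Ls1 := PySem.List.pySetD Ls p.1
      (pvCounterUpd (PySem.List.pyGetD Ls p.1 PySem.Dict.empty) p.2.2)
    PySem.List.pySetD Ls1 p.2.1
      (pvCounterUpd (PySem.List.pyGetD Ls1 p.2.1 PySem.Dict.empty) p.2.2)) Ls0
  (PySem.List.pyRange 1 (N + 1)).foldl (fun ans n =>
    let d := PySem.List.pyGetD Ls n PySem.Dict.empty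
    d.items.foldl (fun ans lc =>
      if 1270 < lc.1 then ans
      else if lc.1 = 1270 then ans + PySem.Int.floordiv (lc.2 * (lc.2 - 1)) 2
      else ans + lc.2 * d.getD (2540 - lc.1) 0) ans) 0

-- ===== PORT B =====
def solve_alt (N : Int) (M : Int) (ABLs : List (Int × Int × Int)) : Int :=
  let adj0 : List (List Int) :=
    (PySem.List.pyRange 0 (N + 1)).map (fun _ => ([] : List Int))
  let adj := ABLs.foldl (fun adj p =>
    let adj1 := PySem.List.pySetD adj p.1 (PySem.List.pyGetD adj p.1 [] ++ [p.2.2])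
    PySem.List.pySetD adj1 p.2.1 (PySem.List.pyGetD adj1 p.2.1 [] ++ [p.2.2])) adj0
  (PySem.List.slice adj (some 1) none).foldl (fun ans lengths =>
    (lengths.foldl (fun st x =>
        (st.1 + st.2.getD (2540 - x) 0, st.2.insert x (st.2.getD x 0 + 1)))
      (ans, (PySem.Dict.empty : PySem.Dict Int Int))).1) 0

-- ===== PRECONDITION & SPEC =====
-- Pre_ excludes exactly the inputs where A raises IndexError: an edge endpoint that is not a
-- valid Python index into the length-(N+1) node list.
def Pre_solve (N : Int) (M : Int) (ABLs : List (Int × Int × Int)) : Prop :=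
  ∀ p ∈ ABLs, PySem.Raise.InRange (N + 1).toNat p.1 ∧ PySem.Raise.InRange (N + 1).toNat p.2.1
instance (N : Int) (M : Int) (ABLs : List (Int × Int × Int)) : Decidable (Pre_solve N M ABLs) := by unfold Pre_solve; infer_instance

def pvWitness_solve : Int × Int × (List (Int × Int × Int)) :=
  (3, 3, [(1, 2, 1000), (1, 3, 1540), (2, 2, 1270)])

def Spec_solve (N : Int) (M : Int) (ABLs : List (Int × Int × Int)) (out : Int) : Prop := out = solve_alt N M ABLs
instance (N : Int) (M : Int) (ABLs : List (Int × Int × Int)) (out : Int) : Decidable (Spec_solve N M ABLs out) := by unfold Spec_solve; infer_instance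

-- ===== CLAIM (what is proved, stated in full; the proofs are below) =====
def Claim_equal_solve : Prop := ∀ (N : Int) (M : Int) (ABLs : List (Int × Int × Int)), Dom_solve N M ABLs → Pre_solve N M ABLs → Spec_solve N M ABLs (solve N M ABLs)

-- ===== LEMMAS AND PROOFS =====

-- the value A's inner items-loop adds at key k for a node whose edge-length list is L
def pvTerm (L : List Int) (k : Int) : Int :=
  if 1270 < k then 0
  else if k = 1270 then
    PySem.Int.floordiv ((L.count k : Int) * ((L.count k : Int) - 1)) 2
  else (L.count k : Int) * (L.count (2540 - k) : Int)

-- the pairs-summing-to-2540 count of one node, as A computes it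
def pvNodeSum (L : List Int) : Int := ((PySem.Set.ofList L).map (pvTerm L)).sum

theorem pv_sum_zero (S : List Int) (f : Int → Int) (hz : ∀ k ∈ S, f k = 0) :
    (S.map f).sum = 0 := by
  induction S with
  | nil => simp
  | cons x S ih => simp [hz x (by simp), ih (fun k hk => hz k (List.mem_cons_of_mem _ hk))]

theorem pv_sum_single {S : List Int} (h : S.Nodup) (f : Int → Int) (a : Int)
    (hz : ∀ k ∈ S, k ≠ a → f k = 0) :
    (S.map f).sum = if a ∈ S then f a else 0 := by
  induction S with
  | nil => simp
  | cons x S ih =>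
    simp only [List.nodup_cons] at h
    by_cases hxa : x = a
    · subst hxa
      have hS : (S.map f).sum = 0 :=
        pv_sum_zero S f (fun k hk => by
          have : k ≠ x := fun he => h.1 (he ▸ hk)
          exact hz k (List.mem_cons_of_mem _ hk) this)
      simp [hS]
    · have := ih h.2 (fun k hk hka => hz k (List.mem_cons_of_mem _ hk) hka)
      simp [this, hz x (by simp) hxa, Ne.symm hxa]

theorem pv_sum_two {S : List Int} (h : S.Nodup) (f : Int → Int) (a b : Int) (hab : a ≠ b)
    (hz : ∀ k ∈ S, k ≠ a → k ≠ b → f k = 0) :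
    (S.map f).sum = (if a ∈ S then f a else 0) + (if b ∈ S then f b else 0) := by
  have hmap : S.map f
      = S.map (fun k => (if k = a then f k else 0) + (if k = b then f k else 0)) := by
    apply List.map_congr_left
    intro k hk
    by_cases hka : k = a
    · subst hka; simp [hab]
    · by_cases hkb : k = b
      · subst hkb; simp [Ne.symm hab]
      · simp [hka, hkb, hz k hk hka hkb]
  rw [hmap, PySem.List.sum_map_add_int]
  rw [pv_sum_single h _ a (fun k _ hka => by simp [hka]),
      pv_sum_single h _ b (fun k _ hkb => by simp [hkb])]
  by_cases ha : a ∈ S <;> by_cases hb : b ∈ S <;> simp [ha, hb]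

theorem pv_count_snoc (L : List Int) (x k : Int) :
    ((L ++ [x]).count k : Int) = (L.count k : Int) + (if k = x then 1 else 0) := by
  rw [List.count_append]
  by_cases h : k = x
  · simp [h]
  · simp [h, Ne.symm h]

theorem pv_term_ne (L : List Int) (x k : Int) (hk : k ≠ x) (hk2 : k ≠ 2540 - x) :
    pvTerm (L ++ [x]) k = pvTerm L k := by
  unfold pvTerm
  have h1 : ((L ++ [x]).count k : Int) = (L.count k : Int) := by
    rw [pv_count_snoc]; simp [hk]
  have h2 : ((L ++ [x]).count (2540 - k) : Int) = (L.count (2540 - k) : Int) := by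
    rw [pv_count_snoc]
    have : ¬ (2540 - k = x) := by omega
    simp [this]
  rw [show (L ++ [x]).count k = L.count k from by exact_mod_cast h1,
      show (L ++ [x]).count (2540 - k) = L.count (2540 - k) from by exact_mod_cast h2]

theorem pv_ofList_snoc (L : List Int) (x : Int) :
    PySem.Set.ofList (L ++ [x])
      = if x ∈ L then PySem.Set.ofList L else PySem.Set.ofList L ++ [x] := by
  rw [PySem.Set.ofList_eq_foldl, List.foldl_append, ← PySem.Set.ofList_eq_foldl]
  by_cases h : x ∈ L
  · simp [PySem.Set.add, (PySem.Set.mem_ofList L x).mpr h, h]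
  · have : x ∉ PySem.Set.ofList L := fun hc => h ((PySem.Set.mem_ofList L x).mp hc)
    simp [PySem.Set.add, this, h]

theorem pv_fdiv_step (c : Int) :
    PySem.Int.floordiv ((c + 1) * c) 2 = PySem.Int.floordiv (c * (c - 1)) 2 + c := by
  rw [PySem.Int.floordiv_eq_ediv_of_pos (by omega), PySem.Int.floordiv_eq_ediv_of_pos (by omega)]
  have h : (c + 1) * c = c * (c - 1) + c * 2 := by ring
  rw [h, Int.add_mul_ediv_right _ _ (by omega : (2:Int) ≠ 0)]

theorem pv_sum_split (L : List Int) (x : Int) (T : List Int) :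
    (T.map (pvTerm (L ++ [x]))).sum
      = (T.map (pvTerm L)).sum + (T.map (fun k => pvTerm (L ++ [x]) k - pvTerm L k)).sum := by
  rw [← PySem.List.sum_map_add_int]
  congr 1
  apply List.map_congr_left
  intro k _
  ring

theorem pvTerm_at_1270 (M : List Int) :
    pvTerm M 1270 = PySem.Int.floordiv ((M.count 1270 : Int) * ((M.count 1270 : Int) - 1)) 2 := by
  unfold pvTerm; norm_num

-- the heart: appending one edge length x to a node's list raises A's per-node value by the
-- number of already-present complements 2540 - x
theorem pv_key (L : List Int) (x : Int) :
    pvNodeSum (L ++ [x]) = pvNodeSum L + (L.count (2540 - x) : Int) := by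
  have hS : (PySem.Set.ofList L).Nodup := PySem.Set.nodup_ofList L
  by_cases hx1270 : x = 1270
  · subst hx1270
    have hc : ((L ++ [1270]).count 1270 : Int) = (L.count 1270 : Int) + 1 := by
      rw [pv_count_snoc]; simp
    have h1270 : pvTerm (L ++ [1270]) 1270 - pvTerm L 1270 = (L.count 1270 : Int) := by
      rw [pvTerm_at_1270, pvTerm_at_1270, hc]
      rw [show ((L.count 1270 : Int) + 1) * ((L.count 1270 : Int) + 1 - 1)
            = ((L.count 1270 : Int) + 1) * (L.count 1270 : Int) from by ring]
      rw [pv_fdiv_step]; ring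
    have hz : ∀ k ∈ PySem.Set.ofList L, k ≠ 1270 →
        pvTerm (L ++ [1270]) k - pvTerm L k = 0 := by
      intro k _ hk
      rw [pv_term_ne L 1270 k hk (by omega)]; ring
    by_cases hmem : (1270:Int) ∈ L
    · have hS' : PySem.Set.ofList (L ++ [1270]) = PySem.Set.ofList L := by
        rw [pv_ofList_snoc]; simp [hmem]
      unfold pvNodeSum
      rw [hS', pv_sum_split,
          pv_sum_single hS _ 1270 hz,
          if_pos ((PySem.Set.mem_ofList L 1270).mpr hmem), h1270]
      norm_num
    · have hc0 : L.count 1270 = 0 := List.count_eq_zero.mpr hmem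
      have hS' : PySem.Set.ofList (L ++ [1270]) = PySem.Set.ofList L ++ [1270] := by
        rw [pv_ofList_snoc]; simp [hmem]
      have hterm : pvTerm (L ++ [1270]) 1270 = 0 := by
        rw [pvTerm_at_1270, hc]
        rw [show (L.count 1270 : Int) = 0 from by exact_mod_cast hc0]
        decide
      unfold pvNodeSum
      rw [hS', List.map_append, List.sum_append, pv_sum_split,
          pv_sum_single hS _ 1270 hz,
          if_neg (fun hc => hmem ((PySem.Set.mem_ofList L 1270).mp hc))]
      simp [hterm, hc0]
  · have hxy : x ≠ 2540 - x := by omega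
    have hz : ∀ k ∈ PySem.Set.ofList L, k ≠ x → k ≠ 2540 - x →
        pvTerm (L ++ [x]) k - pvTerm L k = 0 := by
      intro k _ hk hk2
      rw [pv_term_ne L x k hk hk2]; ring
    have hcx : ((L ++ [x]).count x : Int) = (L.count x : Int) + 1 := by
      rw [pv_count_snoc]; simp
    have hcy : ((L ++ [x]).count (2540 - x) : Int) = (L.count (2540 - x) : Int) := by
      rw [pv_count_snoc]; simp [Ne.symm hxy]
    have hx_val : pvTerm (L ++ [x]) x - pvTerm L x
        = if x < 1270 then (L.count (2540 - x) : Int) else 0 := by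
      unfold pvTerm
      by_cases hlt : 1270 < x
      · simp [hlt, show ¬ (x < 1270) from by omega]
      · have hlt' : x < 1270 := by omega
        rw [if_neg hlt, if_neg hlt, if_neg hx1270, if_neg hx1270, if_pos hlt',
            hcx, hcy]
        ring
    have hy_val : pvTerm (L ++ [x]) (2540 - x) - pvTerm L (2540 - x)
        = if 1270 < x then (L.count (2540 - x) : Int) else 0 := by
      unfold pvTerm
      by_cases hlt : 1270 < x
      · have h1 : ¬ (1270 < 2540 - x) := by omega
        have h2 : ¬ (2540 - x = 1270) := by omega
        rw [if_neg h1, if_neg h1, if_neg h2, if_neg h2, if_pos hlt,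
            show (2540 - (2540 - x)) = x from by ring, hcx, hcy]
        ring
      · have h1 : 1270 < 2540 - x := by omega
        simp [h1, hlt]
    by_cases hmem : x ∈ L
    · have hS' : PySem.Set.ofList (L ++ [x]) = PySem.Set.ofList L := by
        rw [pv_ofList_snoc]; simp [hmem]
      unfold pvNodeSum
      rw [hS', pv_sum_split, pv_sum_two hS _ x (2540 - x) hxy hz,
          if_pos ((PySem.Set.mem_ofList L x).mpr hmem), hx_val, hy_val]
      by_cases hmy : (2540 - x) ∈ L
      · rw [if_pos ((PySem.Set.mem_ofList L (2540 - x)).mpr hmy)]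
        by_cases hlt : 1270 < x
        · rw [if_neg (by omega : ¬ x < 1270), if_pos hlt]; ring
        · rw [if_pos (by omega : x < 1270), if_neg hlt]; ring
      · rw [if_neg (fun hc => hmy ((PySem.Set.mem_ofList L (2540 - x)).mp hc))]
        have hc0 : (L.count (2540 - x) : Int) = 0 := by
          rw [List.count_eq_zero.mpr hmy]; rfl
        rw [hc0]
        by_cases hlt : 1270 < x
        · rw [if_neg (by omega : ¬ x < 1270)]; ring
        · rw [if_pos (by omega : x < 1270)]; ring
    · have hcx0 : (L.count x : Int) = 0 := by rw [List.count_eq_zero.mpr hmem]; rfl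
      have hS' : PySem.Set.ofList (L ++ [x]) = PySem.Set.ofList L ++ [x] := by
        rw [pv_ofList_snoc]; simp [hmem]
      have hxS : x ∉ PySem.Set.ofList L := fun hc => hmem ((PySem.Set.mem_ofList L x).mp hc)
      have hterm : pvTerm (L ++ [x]) x = if x < 1270 then (L.count (2540 - x) : Int) else 0 := by
        unfold pvTerm
        by_cases hlt : 1270 < x
        · simp [hlt, show ¬ (x < 1270) from by omega]
        · have hlt' : x < 1270 := by omega
          rw [if_neg hlt, if_neg hx1270, if_pos hlt', hcx, hcy, hcx0]
          ring
      unfold pvNodeSum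
      rw [hS', List.map_append, List.sum_append, pv_sum_split,
          pv_sum_two hS _ x (2540 - x) hxy hz,
          if_neg hxS]
      simp only [List.map_cons, List.map_nil, List.sum_cons, List.sum_nil]
      rw [hy_val, hterm]
      by_cases hmy : (2540 - x) ∈ L
      · rw [if_pos ((PySem.Set.mem_ofList L (2540 - x)).mpr hmy)]
        by_cases hlt : 1270 < x
        · rw [if_neg (by omega : ¬ x < 1270), if_pos hlt]; ring
        · rw [if_pos (by omega : x < 1270), if_neg hlt]; ring
      · rw [if_neg (fun hc => hmy ((PySem.Set.mem_ofList L (2540 - x)).mp hc))]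
        have hc0 : (L.count (2540 - x) : Int) = 0 := by
          rw [List.count_eq_zero.mpr hmy]; rfl
        rw [hc0]
        by_cases hlt : 1270 < x
        · rw [if_neg (by omega : ¬ x < 1270)]; ring
        · rw [if_pos (by omega : x < 1270)]; ring

theorem pv_streamSnd (L : List Int) (a : Int) (d : PySem.Dict Int Int) :
    (L.foldl (fun st x =>
        (st.1 + st.2.getD (2540 - x) 0, st.2.insert x (st.2.getD x 0 + 1)))
      (a, d)).2 = L.foldl (fun d x => d.insert x (d.getD x 0 + 1)) d := by
  induction L generalizing a d with
  | nil => rfl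
  | cons x L ih => simp [List.foldl, ih]

-- B's per-node streaming pass computes the same per-node value
theorem pv_streamFst (L : List Int) (a : Int) :
    (L.foldl (fun st x =>
        (st.1 + st.2.getD (2540 - x) 0, st.2.insert x (st.2.getD x 0 + 1)))
      (a, (PySem.Dict.empty : PySem.Dict Int Int))).1 = a + pvNodeSum L := by
  induction L using List.reverseRecOn with
  | nil => simp [pvNodeSum]
  | append_singleton L x ih =>
    rw [List.foldl_append]
    simp only [List.foldl_cons, List.foldl_nil]
    rw [pv_key]
    rw [show ((L.foldl (fun st x =>
        (st.1 + st.2.getD (2540 - x) 0, st.2.insert x (st.2.getD x 0 + 1)))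
      (a, (PySem.Dict.empty : PySem.Dict Int Int))).2) = PySem.Dict.counter L from by
        rw [pv_streamSnd, PySem.Dict.foldl_insert_getD_add_one_eq_counter]]
    rw [ih, PySem.Dict.getD_counter]
    ring

-- A's items-loop over a node's Counter computes the same per-node value
theorem pv_innerA (L : List Int) (a : Int) :
    (PySem.Dict.counter L).items.foldl (fun ans lc =>
      if 1270 < lc.1 then ans
      else if lc.1 = 1270 then ans + PySem.Int.floordiv (lc.2 * (lc.2 - 1)) 2
      else ans + lc.2 * (PySem.Dict.counter L).getD (2540 - lc.1) 0) a
    = a + pvNodeSum L := by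
  have hfun : (fun (ans : Int) (lc : Int × Int) =>
      if 1270 < lc.1 then ans
      else if lc.1 = 1270 then ans + PySem.Int.floordiv (lc.2 * (lc.2 - 1)) 2
      else ans + lc.2 * (PySem.Dict.counter L).getD (2540 - lc.1) 0)
      = (fun ans lc => ans + (if 1270 < lc.1 then 0
          else if lc.1 = 1270 then PySem.Int.floordiv (lc.2 * (lc.2 - 1)) 2
          else lc.2 * (PySem.Dict.counter L).getD (2540 - lc.1) 0)) := by
    funext ans lc
    split_ifs <;> ring
  rw [hfun, PySem.List.foldl_add, PySem.Dict.items_counter, List.map_map]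
  congr 1
  apply congrArg
  apply List.map_congr_left
  intro k _
  simp only [Function.comp]
  rw [PySem.Dict.getD_counter]
  unfold pvTerm
  rfl

-- one edge update: A's per-node Counters stay the counters of B's per-node lists
theorem pv_setStep (adj : List (List Int)) (i l : Int) :
    PySem.List.pySetD (adj.map PySem.Dict.counter) i
      (pvCounterUpd (PySem.List.pyGetD (adj.map PySem.Dict.counter) i PySem.Dict.empty) l)
    = (PySem.List.pySetD adj i (PySem.List.pyGetD adj i [] ++ [l])).map PySem.Dict.counter := by
  have hget : PySem.List.pyGetD (adj.map PySem.Dict.counter) i PySem.Dict.empty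
      = PySem.Dict.counter (PySem.List.pyGetD adj i []) := by
    have := PySem.List.pyGetD_map (PySem.Dict.counter) adj i []
    simpa using this
  rw [hget]
  have hupd : pvCounterUpd (PySem.Dict.counter (PySem.List.pyGetD adj i [])) l
      = PySem.Dict.counter (PySem.List.pyGetD adj i [] ++ [l]) := by
    rw [PySem.Dict.counter_append_singleton]; rfl
  rw [hupd]
  unfold PySem.List.pySetD PySem.List.pySet?
  rw [List.length_map]
  cases h : PySem.List.pyIdx? adj.length i <;> simp [List.map_set]

theorem pv_sim (edges : List (Int × Int × Int)) (adj : List (List Int)) :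
    edges.foldl (fun Ls p =>
      let Ls1 := PySem.List.pySetD Ls p.1
        (pvCounterUpd (PySem.List.pyGetD Ls p.1 PySem.Dict.empty) p.2.2)
      PySem.List.pySetD Ls1 p.2.1
        (pvCounterUpd (PySem.List.pyGetD Ls1 p.2.1 PySem.Dict.empty) p.2.2))
      (adj.map PySem.Dict.counter)
    = (edges.foldl (fun adj p =>
        let adj1 := PySem.List.pySetD adj p.1 (PySem.List.pyGetD adj p.1 [] ++ [p.2.2])
        PySem.List.pySetD adj1 p.2.1 (PySem.List.pyGetD adj1 p.2.1 [] ++ [p.2.2])) adj).map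
        PySem.Dict.counter := by
  induction edges generalizing adj with
  | nil => rfl
  | cons e edges ih =>
    simp only [List.foldl_cons]
    rw [pv_setStep, pv_setStep, ih]

theorem pv_lenB (edges : List (Int × Int × Int)) (adj : List (List Int)) :
    (edges.foldl (fun adj p =>
        let adj1 := PySem.List.pySetD adj p.1 (PySem.List.pyGetD adj p.1 [] ++ [p.2.2])
        PySem.List.pySetD adj1 p.2.1 (PySem.List.pyGetD adj1 p.2.1 [] ++ [p.2.2])) adj).length
      = adj.length := by
  induction edges generalizing adj with
  | nil => rfl
  | cons e edges ih =>
    simp only [List.foldl_cons]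
    rw [ih, PySem.List.length_pySetD, PySem.List.length_pySetD]

-- ===== VERDICT (by name: the statement is the Claim_ definition above) =====
theorem solve_spec : Claim_equal_solve := by
  unfold Claim_equal_solve
  intro N M ABLs _ _
  unfold Spec_solve solve solve_alt
  dsimp only
  rw [show ((PySem.List.pyRange 0 (N + 1)).map
        (fun _ => (PySem.Dict.empty : PySem.Dict Int Int)))
      = ((PySem.List.pyRange 0 (N + 1)).map (fun _ => ([] : List Int))).map
          PySem.Dict.counter from by rw [List.map_map]; rfl]
  rw [pv_sim]
  have hA : (fun (ans n : Int) =>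
      (PySem.List.pyGetD ((ABLs.foldl (fun adj p =>
        let adj1 := PySem.List.pySetD adj p.1 (PySem.List.pyGetD adj p.1 [] ++ [p.2.2])
        PySem.List.pySetD adj1 p.2.1 (PySem.List.pyGetD adj1 p.2.1 [] ++ [p.2.2]))
          ((PySem.List.pyRange 0 (N + 1)).map (fun _ => ([] : List Int)))).map
          PySem.Dict.counter) n PySem.Dict.empty).items.foldl (fun ans lc =>
        if 1270 < lc.1 then ans
        else if lc.1 = 1270 then ans + PySem.Int.floordiv (lc.2 * (lc.2 - 1)) 2
        else ans + lc.2 * (PySem.List.pyGetD ((ABLs.foldl (fun adj p =>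
          let adj1 := PySem.List.pySetD adj p.1 (PySem.List.pyGetD adj p.1 [] ++ [p.2.2])
          PySem.List.pySetD adj1 p.2.1 (PySem.List.pyGetD adj1 p.2.1 [] ++ [p.2.2]))
            ((PySem.List.pyRange 0 (N + 1)).map (fun _ => ([] : List Int)))).map
            PySem.Dict.counter) n PySem.Dict.empty).getD (2540 - lc.1) 0) ans)
      = (fun ans n => ans + pvNodeSum (PySem.List.pyGetD
          (ABLs.foldl (fun adj p =>
            let adj1 := PySem.List.pySetD adj p.1 (PySem.List.pyGetD adj p.1 [] ++ [p.2.2])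
            PySem.List.pySetD adj1 p.2.1 (PySem.List.pyGetD adj1 p.2.1 [] ++ [p.2.2]))
            ((PySem.List.pyRange 0 (N + 1)).map (fun _ => ([] : List Int)))) n [])) := by
    funext ans n
    rw [show PySem.List.pyGetD ((ABLs.foldl (fun adj p =>
          let adj1 := PySem.List.pySetD adj p.1 (PySem.List.pyGetD adj p.1 [] ++ [p.2.2])
          PySem.List.pySetD adj1 p.2.1 (PySem.List.pyGetD adj1 p.2.1 [] ++ [p.2.2]))
            ((PySem.List.pyRange 0 (N + 1)).map (fun _ => ([] : List Int)))).map
            PySem.Dict.counter) n PySem.Dict.empty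
        = PySem.Dict.counter (PySem.List.pyGetD (ABLs.foldl (fun adj p =>
          let adj1 := PySem.List.pySetD adj p.1 (PySem.List.pyGetD adj p.1 [] ++ [p.2.2])
          PySem.List.pySetD adj1 p.2.1 (PySem.List.pyGetD adj1 p.2.1 [] ++ [p.2.2]))
            ((PySem.List.pyRange 0 (N + 1)).map (fun _ => ([] : List Int)))) n []) from by
      simpa using PySem.List.pyGetD_map PySem.Dict.counter _ n []]
    exact pv_innerA _ ans
  rw [hA]
  have hB : (fun (ans : Int) (lengths : List Int) =>
      (lengths.foldl (fun st x =>
          (st.1 + st.2.getD (2540 - x) 0, st.2.insert x (st.2.getD x 0 + 1)))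
        (ans, (PySem.Dict.empty : PySem.Dict Int Int))).1)
      = (fun ans lengths => ans + pvNodeSum lengths) := by
    funext ans lengths
    exact pv_streamFst lengths ans
  rw [hB]
  rw [PySem.List.slice_from _ (by omega : (0:Int) ≤ 1)]
  set adjF := ABLs.foldl (fun adj p =>
      let adj1 := PySem.List.pySetD adj p.1 (PySem.List.pyGetD adj p.1 [] ++ [p.2.2])
      PySem.List.pySetD adj1 p.2.1 (PySem.List.pyGetD adj1 p.2.1 [] ++ [p.2.2]))
      ((PySem.List.pyRange 0 (N + 1)).map (fun _ => ([] : List Int))) with hadjF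
  have hlen : adjF.length = (N + 1).toNat := by
    rw [hadjF, pv_lenB, List.length_map, PySem.List.length_pyRange_one]
    norm_num
  by_cases hN : 0 ≤ N + 1
  · have hlen' : (N + 1) = PySem.List.len adjF := by
      rw [PySem.List.len, hlen]; omega
    rw [show PySem.List.pyRange 1 (N + 1) = PySem.List.pyRange 1 (PySem.List.len adjF) from by
      rw [← hlen']]
    exact PySem.List.foldl_pyRange_pyGetD adjF [] (fun a L => a + pvNodeSum L) 0
      (by omega : (0:Int) ≤ 1)
  · have h0 : adjF = [] := by
      have := hlen
      rw [show (N + 1).toNat = 0 from by omega] at this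
      exact List.eq_nil_of_length_eq_zero this
    rw [h0, PySem.List.pyRange_one_eq_nil (by omega : N + 1 ≤ 1)]
    rfl
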